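-- pv_equiv track=rewrite | github.com/valthalion/aoc2023 | puzzle12.py | check
-- ===== SOURCE A (Python) =====
-- def check(pattern, descriptor):
--     groups, group = [], 0
--     for c in pattern:
--         if c == '#':
--             group += 1
--         else:
--             if group:
--                 groups.append(group)
--                 group = 0
--     if group:
--         groups.append(group)
--     return tuple(groups) == descriptor
-- ===== SOURCE B (Python) =====
-- def check(pattern, descriptor):
--     # Blank out every non-'#' character, then let str.split() carve out the
--     # maximal '#' runs in one grouping pass; compare their lengths.
--     runs = ''.join(c if c == '#' else ' ' for c in pattern).split()
--     return tuple(len(r) for r in runs) == descriptor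
-- ===== Notes on version B (the rewrite author's own statement) =====
-- stated objective: idiomatic
-- what changed: Replaced the manual running-counter state machine with its post-loop flush by a grouping pass: blank out non-'#' characters and let str.split() extract the maximal '#' runs, then compare their lengths to the descriptor.
import Mathlib
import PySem

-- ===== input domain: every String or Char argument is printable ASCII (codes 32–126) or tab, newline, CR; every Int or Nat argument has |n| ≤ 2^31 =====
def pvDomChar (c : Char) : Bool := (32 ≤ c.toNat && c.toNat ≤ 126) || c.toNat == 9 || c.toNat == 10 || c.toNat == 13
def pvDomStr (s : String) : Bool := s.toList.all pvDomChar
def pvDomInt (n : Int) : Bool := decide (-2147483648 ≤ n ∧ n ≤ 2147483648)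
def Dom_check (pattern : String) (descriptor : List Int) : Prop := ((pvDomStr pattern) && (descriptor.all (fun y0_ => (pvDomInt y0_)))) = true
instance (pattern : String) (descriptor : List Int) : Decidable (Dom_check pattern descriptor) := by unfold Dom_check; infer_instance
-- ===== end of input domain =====

-- B replaces A's running-counter state machine by a grouping pass (blank non-'#', split, take lengths); objective: idiomatic.
-- ===== PORT A =====
def checkStep (st : List Int × Int) (c : Char) : List Int × Int :=
  if c = '#' then (st.1, st.2 + 1)
  else if st.2 ≠ 0 then (st.1 ++ [st.2], 0) else (st.1, st.2)

def check (pattern : String) (descriptor : List Int) : Bool :=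
  let st := pattern.toList.foldl checkStep ([], 0)
  let groups := if st.2 ≠ 0 then st.1 ++ [st.2] else st.1
  decide (groups = descriptor)

-- ===== PORT B =====
def check_alt (pattern : String) (descriptor : List Int) : Bool :=
  -- ''.join(c if c == '#' else ' ' for c in pattern).split()
  let runs := PySem.Chars.split₀ (pattern.toList.map (fun c => if c = '#' then c else ' '))
  decide (runs.map (fun r => (r.length : Int)) = descriptor)

-- ===== PRECONDITION & SPEC =====
def Spec_check (pattern : String) (descriptor : List Int) (out : Bool) : Prop := out = check_alt pattern descriptor
instance (pattern : String) (descriptor : List Int) (out : Bool) : Decidable (Spec_check pattern descriptor out) := by unfold Spec_check; infer_instance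

-- ===== CLAIM (what is proved, stated in full; the proofs are below) =====
def Claim_equal_check : Prop := ∀ (pattern : String) (descriptor : List Int), Dom_check pattern descriptor → Spec_check pattern descriptor (check pattern descriptor)

-- ===== LEMMAS AND PROOFS =====
-- Common characterisation: run-lengths of maximal '#' runs of cs, with g the length of the run in progress.
def pvRuns : List Char → Int → List Int
  | [], g => if g ≠ 0 then [g] else []
  | c :: cs, g =>
    if c = '#' then pvRuns cs (g + 1)
    else (if g ≠ 0 then [g] else []) ++ pvRuns cs 0

lemma checkA_runs (cs : List Char) (gs : List Int) (g : Int) :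
    (if (cs.foldl checkStep (gs, g)).2 ≠ 0 then
        (cs.foldl checkStep (gs, g)).1 ++ [(cs.foldl checkStep (gs, g)).2]
      else (cs.foldl checkStep (gs, g)).1) = gs ++ pvRuns cs g := by
  induction cs generalizing gs g with
  | nil => by_cases h : g = 0 <;> simp [pvRuns, h]
  | cons c cs ih =>
    by_cases hc : c = '#'
    · simp only [List.foldl_cons, checkStep, hc, pvRuns, if_true]
      exact ih gs (g + 1)
    · by_cases hg : g = 0
      · simp only [List.foldl_cons, checkStep, if_neg hc, hg, pvRuns]
        simpa using ih gs 0
      · simp only [List.foldl_cons, checkStep, if_neg hc, if_pos hg, pvRuns]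
        rw [ih (gs ++ [g]) 0]
        simp [List.append_assoc]

lemma go_hash (ws : List Char) (cur : List Char) (acc : List (List Char)) :
    PySem.Chars.split₀.go ('#' :: ws) cur acc = PySem.Chars.split₀.go ws ('#' :: cur) acc := by
  simp [PySem.Chars.split₀.go, show PySem.Chars.isspace '#' = false from by decide]

lemma go_space (ws : List Char) (cur : List Char) (acc : List (List Char)) :
    PySem.Chars.split₀.go (' ' :: ws) cur acc =
      if cur.isEmpty then PySem.Chars.split₀.go ws [] acc
      else PySem.Chars.split₀.go ws [] (cur.reverse :: acc) := by
  simp [PySem.Chars.split₀.go, show PySem.Chars.isspace ' ' = true from by decide]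

lemma checkB_runs (cs : List Char) (cur : List Char) (acc : List (List Char)) :
    (PySem.Chars.split₀.go (cs.map (fun c => if c = '#' then c else ' ')) cur acc).map
        (fun r => (r.length : Int)) =
      acc.reverse.map (fun r => (r.length : Int)) ++ pvRuns cs (cur.length : Int) := by
  induction cs generalizing cur acc with
  | nil =>
    by_cases h : cur.isEmpty
    · simp_all [PySem.Chars.split₀.go, pvRuns, List.isEmpty_iff]
    · have hne : cur ≠ [] := by simpa [List.isEmpty_iff] using h
      simp [PySem.Chars.split₀.go, h, pvRuns, hne, List.length_eq_zero_iff]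
  | cons c cs ih =>
    by_cases hc : c = '#'
    · simp only [List.map_cons, hc, go_hash, pvRuns, if_true]
      rw [ih ('#' :: cur) acc]
      simp only [List.length_cons]
      push_cast
      ring_nf
    · by_cases hcur : cur.isEmpty
      · have h0 : cur.length = 0 := by simpa [List.isEmpty_iff, List.length_eq_zero_iff] using hcur
        simp only [List.map_cons, if_neg hc, go_space, hcur, if_true, pvRuns]
        rw [ih [] acc]
        simp [h0]
      · have hne : cur ≠ [] := by simpa [List.isEmpty_iff] using hcur
        have h0 : (cur.length : Int) ≠ 0 := by simp [List.length_eq_zero_iff, hne]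
        simp only [List.map_cons, if_neg hc, go_space, hcur, Bool.false_eq_true, if_false, pvRuns]
        rw [ih [] (cur.reverse :: acc)]
        simp [hne]

-- ===== VERDICT (by name: the statement is the Claim_ definition above) =====
theorem check_spec : Claim_equal_check := by
  intro pattern descriptor _
  unfold Spec_check
  simp only [check, check_alt, PySem.Chars.split₀]
  rw [checkA_runs pattern.toList [] 0]
  have hB := checkB_runs pattern.toList [] []
  simp only [List.reverse_nil, List.map_nil, List.nil_append] at hB
  simp [hB]
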